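-- pv_equiv track=rewrite | github.com/BCJonkhout/msc-thesis-code | src/pilot/architectures/graphrag.py | _pack_within_budget
-- ===== SOURCE A (Python) =====
-- def _pack_within_budget(
--     items: list[tuple[str, int]],
--     budget_tokens: int,
-- ) -> list[str]:
--     """Greedy token-budget packer. Items are (text, approx_token_count).
--     Returns the prefix that fits."""
--     used = 0
--     out: list[str] = []
--     for text, tok in items:
--         if used + tok > budget_tokens:
--             break
--         out.append(text)
--         used += tok
--     return out
-- ===== SOURCE B (Python) =====
-- def _pack_within_budget(
--     items: list[tuple[str, int]],
--     budget_tokens: int,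
-- ) -> list[str]:
--     """Greedy token-budget packer. Items are (text, approx_token_count).
--     Returns the prefix that fits."""
--     cums = []
--     run = 0
--     for _, tok in items:
--         run += tok
--         cums.append(run)
--     k = next((i for i, c in enumerate(cums) if c > budget_tokens), len(cums))
--     return [text for text, _ in items[:k]]
-- ===== Notes on version B (the rewrite author's own statement) =====
-- stated objective: alternative
-- what changed: Replaces the hand-threaded running-sum loop with break by a precomputed prefix-sum list, finding the first index whose cumulative total exceeds the budget, and returning that prefix's texts via a slice.
import Mathlib
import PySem

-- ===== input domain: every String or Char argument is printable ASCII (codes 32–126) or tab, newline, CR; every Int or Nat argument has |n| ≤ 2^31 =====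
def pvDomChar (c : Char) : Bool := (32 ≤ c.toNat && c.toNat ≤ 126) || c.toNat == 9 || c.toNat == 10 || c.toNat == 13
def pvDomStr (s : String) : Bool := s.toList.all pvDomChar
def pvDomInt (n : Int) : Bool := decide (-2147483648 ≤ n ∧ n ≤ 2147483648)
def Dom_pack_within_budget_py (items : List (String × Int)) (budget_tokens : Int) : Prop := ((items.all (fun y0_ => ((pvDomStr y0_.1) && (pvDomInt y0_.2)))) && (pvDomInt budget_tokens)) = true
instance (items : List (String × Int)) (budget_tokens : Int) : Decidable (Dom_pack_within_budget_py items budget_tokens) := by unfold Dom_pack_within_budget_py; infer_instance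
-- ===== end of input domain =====

-- ===== PORT A =====
-- loop: threads `used`, appends until used + tok > budget, then breaks
def pvPackLoopA (budget_tokens : Int) : List (String × Int) → Int → List String
  | [], _ => []
  | (text, tok) :: rest, used =>
      if used + tok > budget_tokens then []
      else text :: pvPackLoopA budget_tokens rest (used + tok)

def pack_within_budget_py (items : List (String × Int)) (budget_tokens : Int) : List String :=
  pvPackLoopA budget_tokens items 0

-- ===== PORT B =====
-- prefix sums of the token counts (Source B's `cums`)
def pvCumScan : List (String × Int) → Int → List Int
  | [], _ => []
  | (_, tok) :: rest, run => (run + tok) :: pvCumScan rest (run + tok)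

def pack_within_budget_py_alt (items : List (String × Int)) (budget_tokens : Int) : List String :=
  let cums := pvCumScan items 0
  let k := (cums.findIdx? (fun c => budget_tokens < c)).getD cums.length
  (items.take k).map Prod.fst

-- ===== PRECONDITION & SPEC =====
def Spec_pack_within_budget_py (items : List (String × Int)) (budget_tokens : Int) (out : List String) : Prop := out = pack_within_budget_py_alt items budget_tokens
instance (items : List (String × Int)) (budget_tokens : Int) (out : List String) : Decidable (Spec_pack_within_budget_py items budget_tokens out) := by unfold Spec_pack_within_budget_py; infer_instance

-- ===== CLAIM (what is proved, stated in full; the proofs are below) =====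
def Claim_equal_pack_within_budget_py : Prop := ∀ (items : List (String × Int)) (budget_tokens : Int), Dom_pack_within_budget_py items budget_tokens → Spec_pack_within_budget_py items budget_tokens (pack_within_budget_py items budget_tokens)

-- ===== LEMMAS AND PROOFS =====

-- ===== VERDICT (by name: the statement is the Claim_ definition above) =====
lemma pvPack_eq (budget_tokens : Int) :
    ∀ (items : List (String × Int)) (used : Int),
      pvPackLoopA budget_tokens items used =
        (items.take (((pvCumScan items used).findIdx? (fun c => budget_tokens < c)).getD
          (pvCumScan items used).length)).map Prod.fst := by
  intro items
  induction items with
  | nil => intro used; simp [pvPackLoopA, pvCumScan]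
  | cons hd rest ih =>
      intro used
      obtain ⟨text, tok⟩ := hd
      by_cases h : used + tok > budget_tokens
      · simp [pvPackLoopA, pvCumScan, h, List.findIdx?_cons]
      · simp [pvPackLoopA, pvCumScan, h, List.findIdx?_cons, ih (used + tok)]

theorem pack_within_budget_py_spec : Claim_equal_pack_within_budget_py := by
  intro items budget_tokens _
  unfold Spec_pack_within_budget_py pack_within_budget_py pack_within_budget_py_alt
  exact pvPack_eq budget_tokens items 0
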